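-- pv_equiv track=rewrite | github.com/scawful/Oracle-of-Secrets | scripts/campaign/collision_navigator.py | path_to_directions
-- ===== SOURCE A (Python) =====
-- from typing import Any, Dict, List, Optional, Tuple, Set
--
-- def path_to_directions(path: List[Tuple[int, int]]) -> List[Tuple[str, int]]:
--     """Convert tile path to movement directions.
--
--     Args:
--         path: List of tile coordinates
--
--     Returns:
--         List of (direction, tiles) tuples with merged consecutive directions
--     """
--     if len(path) < 2:
--         return []
--
--     directions = []
--     current_dir = None
--     current_count = 0
--
--     for i in range(1, len(path)):
--         prev = path[i - 1]
--         curr = path[i]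
--         dx = curr[0] - prev[0]
--         dy = curr[1] - prev[1]
--
--         if dx > 0:
--             direction = "RIGHT"
--         elif dx < 0:
--             direction = "LEFT"
--         elif dy > 0:
--             direction = "DOWN"
--         elif dy < 0:
--             direction = "UP"
--         else:
--             continue
--
--         if direction == current_dir:
--             current_count += 1
--         else:
--             if current_dir:
--                 directions.append((current_dir, current_count))
--             current_dir = direction
--             current_count = 1
--
--     if current_dir:
--         directions.append((current_dir, current_count))
--
--     return directions
-- ===== SOURCE B (Python) =====
-- from typing import List, Tuple
--
--
-- def _dir(p: Tuple[int, int], q: Tuple[int, int]) -> str: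
--     # only called on distinct points
--     dx = q[0] - p[0]
--     dy = q[1] - p[1]
--     if dx > 0:
--         return "RIGHT"
--     if dx < 0:
--         return "LEFT"
--     if dy > 0:
--         return "DOWN"
--     return "UP"
--
--
-- def path_to_directions(path: List[Tuple[int, int]]) -> List[Tuple[str, int]]:
--     if len(path) < 2:
--         return []
--     # pass 1: drop zero-movement steps by collapsing consecutive duplicate points
--     pts: List[Tuple[int, int]] = []
--     for p in path:
--         if not pts or p != pts[-1]:
--             pts.append(p)
--     # pass 2: two-pointer extraction of maximal same-direction runs over coordinates
--     out: List[Tuple[str, int]] = []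
--     i, n = 0, len(pts)
--     while i + 1 < n:
--         d = _dir(pts[i], pts[i + 1])
--         j = i + 1
--         while j + 1 < n and _dir(pts[j], pts[j + 1]) == d:
--             j += 1
--         out.append((d, j - i))
--         i = j
--     return out
-- ===== Notes on version B (the rewrite author's own statement) =====
-- stated objective: alternative
-- what changed: Replaced A's per-step run-length-encoding state machine by a two-phase geometric approach: first collapse consecutive duplicate coordinates, then extract maximal same-direction runs directly on the point list with two index pointers (no per-step label list, no direction/count accumulator state).
import Mathlib
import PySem

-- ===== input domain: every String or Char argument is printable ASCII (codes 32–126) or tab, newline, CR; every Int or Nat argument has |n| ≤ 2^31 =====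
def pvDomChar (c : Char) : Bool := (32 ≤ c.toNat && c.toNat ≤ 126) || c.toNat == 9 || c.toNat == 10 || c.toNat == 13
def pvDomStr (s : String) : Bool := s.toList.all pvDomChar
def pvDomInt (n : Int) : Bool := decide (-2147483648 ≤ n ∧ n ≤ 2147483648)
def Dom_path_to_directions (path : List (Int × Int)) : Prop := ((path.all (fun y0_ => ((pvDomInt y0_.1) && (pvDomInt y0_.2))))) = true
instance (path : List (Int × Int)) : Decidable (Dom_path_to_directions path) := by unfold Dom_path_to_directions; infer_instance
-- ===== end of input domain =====

-- B replaces A's single-pass run-length-encoding state machine by two phases: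
-- collapse consecutive duplicate coordinates, then extract maximal
-- same-direction runs on the point list with two index pointers; same O(n) cost.

-- ===== PORT A =====
-- A's loop over i in range(1, len(path)): state = (directions, current_dir, current_count).
def pathToDirLoop (prev : Int × Int) (rest : List (Int × Int))
    (dirs : List (String × Int)) (cur : Option String) (cnt : Int) :
    List (String × Int) :=
  match rest with
  | [] =>
    match cur with
    | some d => dirs ++ [(d, cnt)]
    | none => dirs
  | curr :: rest' =>
    let dx := curr.1 - prev.1
    let dy := curr.2 - prev.2
    let direction : Option String :=
      if dx > 0 then some "RIGHT"
      else if dx < 0 then some "LEFT"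
      else if dy > 0 then some "DOWN"
      else if dy < 0 then some "UP"
      else none
    match direction with
    | none => pathToDirLoop curr rest' dirs cur cnt      -- continue
    | some d =>
      if some d = cur then
        pathToDirLoop curr rest' dirs cur (cnt + 1)
      else
        match cur with
        | some cd => pathToDirLoop curr rest' (dirs ++ [(cd, cnt)]) (some d) 1
        | none => pathToDirLoop curr rest' dirs (some d) 1

def path_to_directions (path : List (Int × Int)) : List (String × Int) :=
  match path with
  | [] => []        -- len(path) < 2
  | [_] => []
  | p :: rest => pathToDirLoop p rest [] none 0

-- ===== PORT B =====
-- _dir in Source B: only applied to distinct points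
def dirOf (p q : Int × Int) : String :=
  let dx := q.1 - p.1
  let dy := q.2 - p.2
  if dx > 0 then "RIGHT"
  else if dx < 0 then "LEFT"
  else if dy > 0 then "DOWN"
  else "UP"

-- pass 1 of Source B: collapse consecutive duplicate points (keep the first)
def dedupPts : List (Int × Int) → List (Int × Int)
  | [] => []
  | [p] => [p]
  | p :: q :: rest => if q = p then dedupPts (p :: rest) else p :: dedupPts (q :: rest)
  termination_by l => l.length

-- Source B's inner while loop: advance j while the next step keeps direction d;
-- returns (run length so far, current point, remaining points)
def grow (d : String) (cnt : Int) (p : Int × Int) :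
    List (Int × Int) → Int × (Int × Int) × List (Int × Int)
  | [] => (cnt, p, [])
  | q :: rest => if dirOf p q = d then grow d (cnt + 1) q rest else (cnt, p, q :: rest)

theorem grow_rest_length (d : String) (cnt : Int) (p : Int × Int)
    (l : List (Int × Int)) : (grow d cnt p l).2.2.length ≤ l.length := by
  induction l generalizing cnt p with
  | nil => simp [grow]
  | cons q rest ih =>
    simp only [grow]
    split
    · exact le_trans (ih _ _) (Nat.le_succ _)
    · simp

-- Source B's outer while loop: one maximal run per iteration
def runsFrom (p : Int × Int) (l : List (Int × Int)) : List (String × Int) :=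
  match l with
  | [] => []
  | q :: rest =>
    let d := dirOf p q
    let r := grow d 1 q rest
    (d, r.1) :: runsFrom r.2.1 r.2.2
  termination_by l.length
  decreasing_by
    exact Nat.lt_succ_of_le (grow_rest_length _ _ _ _)

def path_to_directions_alt (path : List (Int × Int)) : List (String × Int) :=
  if path.length < 2 then []
  else
    match dedupPts path with
    | [] => []
    | p :: rest => runsFrom p rest

-- ===== PRECONDITION & SPEC =====
def Spec_path_to_directions (path : List (Int × Int)) (out : List (String × Int)) : Prop := out = path_to_directions_alt path
instance (path : List (Int × Int)) (out : List (String × Int)) : Decidable (Spec_path_to_directions path out) := by unfold Spec_path_to_directions; infer_instance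

-- ===== CLAIM (what is proved, stated in full; the proofs are below) =====
def Claim_equal_path_to_directions : Prop := ∀ (path : List (Int × Int)), Dom_path_to_directions path → Spec_path_to_directions path (path_to_directions path)

-- ===== LEMMAS AND PROOFS =====

-- proof-side common normal form: the step-direction label (none on a zero step)
def stepDir (prev curr : Int × Int) : Option String :=
  let dx := curr.1 - prev.1
  let dy := curr.2 - prev.2
  if dx > 0 then some "RIGHT"
  else if dx < 0 then some "LEFT"
  else if dy > 0 then some "DOWN"
  else if dy < 0 then some "UP"
  else none

-- flat label list of a path starting at prev
def labelsFrom (prev : Int × Int) (rest : List (Int × Int)) : List String :=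
  ((prev :: rest).zip rest).filterMap (fun pc => stepDir pc.1 pc.2)

-- run-length encoding of a label list (proof-side normal form)
def groupRuns : List String → List (String × Int)
  | [] => []
  | x :: xs =>
    (x, (1 : Int) + (xs.takeWhile (· = x)).length) :: groupRuns (xs.dropWhile (· = x))
  termination_by l => l.length
  decreasing_by
    simpa using Nat.lt_succ_of_le (List.length_dropWhile_le _ _)

-- A's pending-run continuation, expressed over the flat label list
def runAux (d : String) (c : Int) : List String → List (String × Int)
  | [] => [(d, c)]
  | x :: xs => if x = d then runAux d (c + 1) xs else (d, c) :: runAux x 1 xs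

theorem groupRuns_nil : groupRuns [] = [] := by simp [groupRuns.eq_def]

theorem groupRuns_cons' (x : String) (xs : List String) :
    groupRuns (x :: xs) =
      (x, (1 : Int) + (xs.takeWhile (· = x)).length) :: groupRuns (xs.dropWhile (· = x)) := by
  rw [groupRuns.eq_def]

theorem runAux_eq_groupRuns (l : List String) (d : String) (c : Int) :
    runAux d c l = (d, c + (l.takeWhile (· = d)).length) :: groupRuns (l.dropWhile (· = d)) := by
  induction l generalizing d c with
  | nil => simp [runAux, groupRuns_nil]
  | cons x xs ih =>
    by_cases h : x = d
    · subst h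
      simp only [runAux, ih]
      simp only [List.takeWhile_cons, List.dropWhile_cons, decide_true, if_true,
        List.length_cons]
      congr 2
      omega
    · simp only [runAux, if_neg h, ih x 1, ← groupRuns_cons']
      simp [h]

theorem groupRuns_cons (x : String) (xs : List String) :
    groupRuns (x :: xs) = runAux x 1 xs := by
  rw [groupRuns_cons', runAux_eq_groupRuns]

theorem labelsFrom_nil (prev : Int × Int) : labelsFrom prev [] = [] := by
  simp [labelsFrom]

theorem labelsFrom_cons (prev curr : Int × Int) (rest : List (Int × Int)) :
    labelsFrom prev (curr :: rest) =
      match stepDir prev curr with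
      | some d => d :: labelsFrom curr rest
      | none => labelsFrom curr rest := by
  cases h : stepDir prev curr <;> simp [labelsFrom, List.zip, h]

-- one step of A's loop, with the direction if-chain folded into stepDir
theorem loop_cons (prev curr : Int × Int) (rest' : List (Int × Int))
    (dirs : List (String × Int)) (cur : Option String) (cnt : Int) :
    pathToDirLoop prev (curr :: rest') dirs cur cnt =
      match stepDir prev curr with
      | none => pathToDirLoop curr rest' dirs cur cnt
      | some d =>
        if some d = cur then pathToDirLoop curr rest' dirs cur (cnt + 1)
        else
          match cur with
          | some cd => pathToDirLoop curr rest' (dirs ++ [(cd, cnt)]) (some d) 1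
          | none => pathToDirLoop curr rest' dirs (some d) 1 := rfl

theorem loop_some (prev : Int × Int) (rest : List (Int × Int)) (dirs : List (String × Int)) (d : String) (cnt : Int) :
    pathToDirLoop prev rest dirs (some d) cnt = dirs ++ runAux d cnt (labelsFrom prev rest) := by
  induction rest generalizing prev dirs d cnt with
  | nil => simp [pathToDirLoop, labelsFrom_nil, runAux]
  | cons curr rest' ih =>
    cases h : stepDir prev curr with
    | none =>
      simp only [loop_cons, labelsFrom_cons, h]
      exact ih curr dirs d cnt
    | some e =>
      simp only [loop_cons, labelsFrom_cons, h]
      by_cases he : e = d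
      · subst he
        rw [if_pos rfl, ih]
        simp [runAux]
      · rw [if_neg (by simpa using he), ih]
        simp [runAux, he]

theorem loop_none (prev : Int × Int) (rest : List (Int × Int)) (dirs : List (String × Int)) (cnt : Int) :
    pathToDirLoop prev rest dirs none cnt = dirs ++ groupRuns (labelsFrom prev rest) := by
  induction rest generalizing prev dirs cnt with
  | nil => simp [pathToDirLoop, labelsFrom_nil, groupRuns_nil]
  | cons curr rest' ih =>
    cases h : stepDir prev curr with
    | none =>
      simp only [loop_cons, labelsFrom_cons, h]
      exact ih curr dirs cnt
    | some e =>
      simp only [loop_cons, labelsFrom_cons, h, reduceCtorEq, if_false]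
      rw [loop_some, groupRuns_cons]

-- ===== B side: labels of the deduplicated path =====

theorem stepDir_eq_self (p : Int × Int) : stepDir p p = none := by
  simp [stepDir]

theorem stepDir_ne (p q : Int × Int) (h : q ≠ p) : stepDir p q = some (dirOf p q) := by
  have hne : q.1 ≠ p.1 ∨ q.2 ≠ p.2 := by
    by_contra hc
    push_neg at hc
    exact h (Prod.ext hc.1 hc.2)
  simp only [stepDir, dirOf]
  split_ifs <;> first
    | rfl
    | (exfalso; rcases hne with h' | h' <;> omega)

-- per-step labels of a point list with no zero steps
def pureLabels : List (Int × Int) → List String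
  | [] => []
  | [_] => []
  | p :: q :: rest => dirOf p q :: pureLabels (q :: rest)
  termination_by l => l.length

theorem pureLabels_single (p : Int × Int) : pureLabels [p] = [] := by rw [pureLabels]

theorem pureLabels_cons (p q : Int × Int) (rest : List (Int × Int)) :
    pureLabels (p :: q :: rest) = dirOf p q :: pureLabels (q :: rest) := by rw [pureLabels]

theorem dedupPts_single (p : Int × Int) : dedupPts [p] = [p] := by rw [dedupPts]

theorem dedupPts_cons (p q : Int × Int) (rest : List (Int × Int)) :
    dedupPts (p :: q :: rest) =
      if q = p then dedupPts (p :: rest) else p :: dedupPts (q :: rest) := by rw [dedupPts]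

theorem dedupPts_head (q : Int × Int) (l : List (Int × Int)) :
    ∃ t, dedupPts (q :: l) = q :: t := by
  induction l generalizing q with
  | nil => exact ⟨[], dedupPts_single q⟩
  | cons r rest ih =>
    by_cases h : r = q
    · simpa [dedupPts_cons, h] using ih q
    · exact ⟨dedupPts (r :: rest), by simp [dedupPts_cons, h]⟩

theorem labels_dedup (p : Int × Int) (rest : List (Int × Int)) :
    labelsFrom p rest = pureLabels (dedupPts (p :: rest)) := by
  induction rest generalizing p with
  | nil => rw [labelsFrom_nil, dedupPts_single, pureLabels_single]
  | cons q rest' ih =>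
    by_cases h : q = p
    · subst h
      rw [labelsFrom_cons, stepDir_eq_self, dedupPts_cons, if_pos rfl]
      exact ih q
    · rw [labelsFrom_cons, stepDir_ne _ _ h, dedupPts_cons, if_neg h]
      obtain ⟨t, ht⟩ := dedupPts_head q rest'
      rw [ht, pureLabels_cons, ← ht, ih q]

-- grow computes takeWhile/dropWhile on the pure label list
theorem grow_spec (l : List (Int × Int)) (p : Int × Int) (d : String) (cnt : Int) :
    (grow d cnt p l).1 = cnt + ((pureLabels (p :: l)).takeWhile (· = d)).length ∧
    pureLabels ((grow d cnt p l).2.1 :: (grow d cnt p l).2.2) =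
      (pureLabels (p :: l)).dropWhile (· = d) := by
  induction l generalizing p cnt with
  | nil => simp [grow, pureLabels_single]
  | cons q rest ih =>
    rw [pureLabels_cons]
    by_cases h : dirOf p q = d
    · obtain ⟨h1, h2⟩ := ih q (cnt + 1)
      simp only [grow, if_pos h]
      refine ⟨?_, h2.trans ?_⟩
      · rw [h1, List.takeWhile_cons, if_pos (by simp [h])]
        simp only [List.length_cons]
        push_cast
        ring
      · rw [List.dropWhile_cons, if_pos (by simp [h])]
    · simp only [grow, if_neg h]
      refine ⟨?_, ?_⟩
      · rw [List.takeWhile_cons, if_neg (by simp [h])]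
        simp
      · rw [List.dropWhile_cons, if_neg (by simp [h]), pureLabels_cons]

theorem runsFrom_eq_groupRuns (l : List (Int × Int)) (p : Int × Int) :
    runsFrom p l = groupRuns (pureLabels (p :: l)) := by
  induction hn : l.length using Nat.strong_induction_on generalizing p l with
  | _ n ih =>
    match l with
    | [] => rw [runsFrom, pureLabels_single, groupRuns_nil]
    | q :: rest =>
      rw [runsFrom]
      obtain ⟨h1, h2⟩ := grow_spec rest q (dirOf p q) 1
      have hlen : (grow (dirOf p q) 1 q rest).2.2.length < n := by
        subst hn
        exact Nat.lt_succ_of_le (grow_rest_length _ _ _ _)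
      rw [ih _ hlen _ _ rfl, h2, h1, pureLabels_cons, groupRuns_cons']

-- ===== VERDICT (by name: the statement is the Claim_ definition above) =====
theorem path_to_directions_spec : Claim_equal_path_to_directions := by
  intro path _
  unfold Spec_path_to_directions path_to_directions path_to_directions_alt
  match path with
  | [] => simp
  | [_] => simp
  | p :: q :: rest =>
    simp only [List.length_cons]
    rw [if_neg (by omega)]
    rw [loop_none, labels_dedup]
    obtain ⟨t, ht⟩ := dedupPts_head p (q :: rest)
    rw [ht]
    show [] ++ groupRuns (pureLabels (p :: t)) = runsFrom p t
    rw [runsFrom_eq_groupRuns]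
    simp
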